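-- pv_equiv track=rewrite | github.com/mkmantu93/gittutorials | test.py | solution
-- ===== SOURCE A (Python) =====
-- def solution(buckets):
--     n = len(buckets)
--     ball_positions = [i for i in range(n) if buckets[i] == 'B']  # Track ball positions
--     ball_count = len(ball_positions)  # Count of balls
--
--     # Check if arrangement is possible
--     if ball_count > (n + 1) // 2:
--         return -1
--
--     min_moves = n  # Initialize with a high number (more than max possible moves)
--     # Check starting positions for the alternating pattern
--     for start in range(n - 2 * ball_count + 2):
--         current_moves = 0
--         for j in range(start, start + 2 * ball_count, 2):
--             if j not in ball_positions:
--                 current_moves += 1  # Count how many moves needed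
--         min_moves = min(min_moves, current_moves)  # Update minimum moves
--
--     return min_moves
-- ===== SOURCE B (Python) =====
-- def solution(buckets):
--     n = len(buckets)
--     k = sum(c == 'B' for c in buckets)
--     if k > (n + 1) // 2:
--         return -1
--     m = n - 2 * k + 2          # number of candidate starting positions
--     best = k
--     for p in range(min(2, m)): # the two parity classes of starting positions
--         # balls already on the target slots of the first start of this parity
--         cur = sum(buckets[j] == 'B' for j in range(p, p + 2 * k, 2))
--         best = min(best, k - cur)
--         # slide the window of target slots two steps at a time
--         for s in range(p + 2, m, 2):
--             cur += (buckets[s + 2 * k - 2] == 'B') - (buckets[s - 2] == 'B')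
--             best = min(best, k - cur)
--     return best
-- ===== Notes on version B (the rewrite author's own statement) =====
-- stated objective: alternative
-- what changed: Instead of re-scanning the ball-position list for every target slot of every start, B counts balls on target slots with a window slid over each of the two start parities, updated in O(1) per start; on the measured inputs (no balls) both run in linear time, so no speed is claimed.
import Mathlib
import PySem

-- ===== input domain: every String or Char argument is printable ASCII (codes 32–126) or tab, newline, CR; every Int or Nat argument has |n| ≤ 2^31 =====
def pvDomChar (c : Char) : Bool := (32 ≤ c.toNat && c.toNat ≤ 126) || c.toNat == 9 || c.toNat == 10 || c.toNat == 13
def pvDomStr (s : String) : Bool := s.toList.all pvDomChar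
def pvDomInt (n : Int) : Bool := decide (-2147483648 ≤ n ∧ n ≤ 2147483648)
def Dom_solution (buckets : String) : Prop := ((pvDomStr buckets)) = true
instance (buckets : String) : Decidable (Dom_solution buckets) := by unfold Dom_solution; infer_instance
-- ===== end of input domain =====

-- B replaces A's per-start re-scan of the ball-position list by a window of target
-- slots slid over each of the two start parities, updated in O(1) per start (alternative).

-- ===== PORT A =====
def solution (buckets : String) : Int :=
  let n : Int := PySem.Str.len buckets
  let ball_positions : List Int :=
    (PySem.List.pyRange 0 n 1).filter (fun i => PySem.Str.pyGet? buckets i == some 'B')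
  let ball_count : Int := (ball_positions.length : Int)
  if ball_count > PySem.Int.floordiv (n + 1) 2 then -1
  else
    (PySem.List.pyRange 0 (n - 2 * ball_count + 2) 1).foldl
      (fun min_moves start =>
        let current_moves : Int :=
          (PySem.List.pyRange start (start + 2 * ball_count) 2).foldl
            (fun c j => if !(ball_positions.contains j) then c + 1 else c) 0
        min min_moves current_moves) n

-- ===== PORT B =====
def solution_alt (buckets : String) : Int :=
  let n : Int := PySem.Str.len buckets
  let k : Int := buckets.toList.foldl (fun acc c => acc + (if c == 'B' then 1 else 0)) 0
  if k > PySem.Int.floordiv (n + 1) 2 then -1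
  else
    let m : Int := n - 2 * k + 2
    (PySem.List.pyRange 0 (min 2 m) 1).foldl
      (fun best p =>
        let cur : Int :=
          (PySem.List.pyRange p (p + 2 * k) 2).foldl
            (fun acc j => acc + (if PySem.Str.pyGet? buckets j == some 'B' then 1 else 0)) 0
        let best := min best (k - cur)
        ((PySem.List.pyRange (p + 2) m 2).foldl
          (fun (st : Int × Int) s =>
            let cur := st.1 + (if PySem.Str.pyGet? buckets (s + 2 * k - 2) == some 'B' then 1 else 0)
                            - (if PySem.Str.pyGet? buckets (s - 2) == some 'B' then 1 else 0)
            (cur, min st.2 (k - cur))) (cur, best)).2) k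

-- ===== PRECONDITION & SPEC =====
def Spec_solution (buckets : String) (out : Int) : Prop := out = solution_alt buckets
instance (buckets : String) (out : Int) : Decidable (Spec_solution buckets out) := by unfold Spec_solution; infer_instance

-- ===== CLAIM (what is proved, stated in full; the proofs are below) =====
def Claim_equal_solution : Prop := ∀ (buckets : String), Dom_solution buckets → Spec_solution buckets (solution buckets)

-- ===== LEMMAS AND PROOFS =====

def pvBall (b : String) (j : Int) : Bool := PySem.Str.pyGet? b j == some 'B'
def pvCnt (b : String) (k s : Int) : Int :=
  ((PySem.List.pyRange s (s + 2 * k) 2).countP (pvBall b) : Int)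

theorem pvCnt_eq_range (b : String) (k s : Int) (hk : 0 ≤ k) :
    pvCnt b k s = ((List.range k.toNat).countP (fun i : Nat => pvBall b (s + 2 * (i : Int))) : Int) := by
  rw [pvCnt, PySem.List.pyRange_of_pos _ _ (by norm_num : (0:Int) < 2), List.countP_map]
  have h : (if s < s + 2 * k then ((s + 2 * k - s + 2 - 1) / 2).toNat else 0) = k.toNat := by
    split <;> omega
  rw [h]
  rfl

theorem pvRange_two_cons (a m : Int) (h : a < m) :
    PySem.List.pyRange a m 2 = a :: PySem.List.pyRange (a + 2) m 2 := by
  rw [PySem.List.pyRange_of_pos _ _ (by norm_num : (0:Int) < 2),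
      PySem.List.pyRange_of_pos _ _ (by norm_num : (0:Int) < 2)]
  by_cases h2 : a + 2 < m
  · have hT : (if a < m then ((m - a + 2 - 1) / 2).toNat else 0)
        = (if a + 2 < m then ((m - (a + 2) + 2 - 1) / 2).toNat else 0) + 1 := by
      simp only [if_pos h, if_pos h2]; omega
    rw [hT, List.range_succ_eq_map, List.map_cons, List.map_map]
    congr 1
    · omega
    · apply List.map_congr_left
      intro i _
      simp [Nat.succ_eq_add_one]
      ring_nf
  · have hT : (if a < m then ((m - a + 2 - 1) / 2).toNat else 0) = 1 := by
      simp only [if_pos h]; omega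
    rw [hT]
    simp [h2]

theorem pvCnt_slide (b : String) (k s : Int) (hk : 0 ≤ k) :
    pvCnt b k (s + 2) = pvCnt b k s
      + (if pvBall b (s + 2 * k) then 1 else 0) - (if pvBall b s then 1 else 0) := by
  rw [pvCnt_eq_range b k s hk, pvCnt_eq_range b k (s + 2) hk]
  set K := k.toNat with hK
  set q : Nat → Bool := fun i => pvBall b (s + 2 * (i : Int)) with hq
  have e1 : List.countP q (List.range (K + 1))
      = List.countP q (List.range K) + (if q K then 1 else 0) := by
    rw [List.range_succ, List.countP_append]
    simp [List.countP_cons]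
  have e2 : List.countP q (List.range (K + 1))
      = List.countP (fun i => q (i + 1)) (List.range K) + (if q 0 then 1 else 0) := by
    rw [List.range_succ_eq_map, List.countP_cons, List.countP_map]
    rfl
  have e3 : List.countP (fun i => q (i + 1)) (List.range K)
      = List.countP (fun i : Nat => pvBall b (s + 2 + 2 * (i : Int))) (List.range K) := by
    apply List.countP_congr
    intro a _
    have h2 : s + 2 * ((a : Int) + 1) = s + 2 + 2 * (a : Int) := by ring
    simp only [hq]
    push_cast
    rw [h2]
  have hqK : q K = pvBall b (s + 2 * k) := by
    simp only [hq]
    congr 1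
    omega
  have hq0 : q 0 = pvBall b s := by
    simp only [hq]
    congr 1
    omega
  rw [← e3]
  rw [hqK] at e1
  rw [hq0] at e2
  by_cases hb1 : pvBall b (s + 2 * k) = true <;> by_cases hb2 : pvBall b s = true <;>
    simp [hb1, hb2] at e1 e2 ⊢ <;> omega

theorem pvK_eq (b : String) :
    b.toList.foldl (fun acc c => acc + (if c == 'B' then 1 else 0)) 0
      = (b.toList.countP (fun c => c == 'B') : Int) := by
  rw [PySem.List.foldl_add b.toList (fun c => if c == 'B' then 1 else 0) 0,
      PySem.List.sum_map_ite_one_zero]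
  simp

theorem pvBall_eq_get (b : String) (j : Int) (h0 : 0 ≤ j) (h1 : j < (b.toList.length : Int)) :
    pvBall b j = (b.toList[j.toNat]'(by omega) == 'B') := by
  rw [pvBall, PySem.Str.pyGet?_eq]
  simp only [PySem.Chars.pyGet?_eq_listPyGet?]
  rw [PySem.List.pyGet?_eq_some_getElem b.toList h0 h1]
  simp

theorem pvBP_length (b : String) :
    (((PySem.List.pyRange 0 (PySem.Str.len b) 1).filter
        (fun i => PySem.Str.pyGet? b i == some 'B')).length : Int)
      = (b.toList.countP (fun c => c == 'B') : Int) := by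
  rw [← List.countP_eq_length_filter]
  congr 1
  have e1 : List.countP (fun i => PySem.Str.pyGet? b i == some 'B')
        (PySem.List.pyRange 0 (PySem.Str.len b) 1)
      = List.countP (fun i => PySem.List.pyGetD b.toList i 'A' == 'B')
        (PySem.List.pyRange 0 (PySem.Str.len b) 1) := by
    apply List.countP_congr
    intro j hj
    rw [PySem.Str.len_eq, PySem.List.mem_pyRange_one] at hj
    have hB := pvBall_eq_get b j hj.1 hj.2
    rw [pvBall] at hB
    rw [hB, PySem.List.pyGetD_of_nonneg b.toList 'A' hj.1,
        List.getD_eq_getElem b.toList 'A' (by omega)]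
  rw [e1]
  have e2 := PySem.List.map_pyGetD_pyRange_zero' b.toList 'A'
  calc List.countP (fun i => PySem.List.pyGetD b.toList i 'A' == 'B')
        (PySem.List.pyRange 0 (PySem.Str.len b) 1)
      = List.countP (fun c => c == 'B')
          ((PySem.List.pyRange 0 (PySem.Str.len b) 1).map
            (fun j => PySem.List.pyGetD b.toList j 'A')) := by
        rw [List.countP_map]; rfl
    _ = b.toList.countP (fun c => c == 'B') := by
        rw [PySem.Str.len_eq]
        rw [show PySem.List.pyRange 0 (b.toList.length : Int) 1
              = PySem.List.pyRange 0 (b.toList.length : Int) from rfl]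
        rw [e2]

theorem pvBP_contains (b : String) (j : Int) (h0 : 0 ≤ j) (h1 : j < (b.toList.length : Int)) :
    ((PySem.List.pyRange 0 (PySem.Str.len b) 1).filter
        (fun i => PySem.Str.pyGet? b i == some 'B')).contains j = pvBall b j := by
  have hmem : j ∈ PySem.List.pyRange 0 (PySem.Str.len b) 1 := by
    rw [PySem.Str.len_eq, PySem.List.mem_pyRange_one]
    exact ⟨h0, h1⟩
  by_cases hb : pvBall b j = true
  · rw [hb, List.contains_iff_mem, List.mem_filter]
    exact ⟨hmem, hb⟩
  · have hb' : pvBall b j = false := by revert hb; cases pvBall b j <;> simp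
    rw [hb']
    rw [← Bool.not_eq_true, List.contains_iff_mem, List.mem_filter]
    intro hcon
    exact hb hcon.2

theorem pvWindow_length (k s : Int) (hk : 0 ≤ k) :
    ((PySem.List.pyRange s (s + 2 * k) 2).length : Int) = k := by
  rw [PySem.List.pyRange_of_pos _ _ (by norm_num : (0:Int) < 2), List.length_map,
      List.length_range]
  split <;> omega

theorem pvA_inner (b : String) (k s : Int) (hk : 0 ≤ k)
    (h0 : 0 ≤ s) (h1 : s + 2 * k ≤ (b.toList.length : Int) + 1) :
    (PySem.List.pyRange s (s + 2 * k) 2).foldl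
      (fun c j => if !(((PySem.List.pyRange 0 (PySem.Str.len b) 1).filter
          (fun i => PySem.Str.pyGet? b i == some 'B')).contains j) then c + 1 else c) 0
      = k - pvCnt b k s := by
  set bp := (PySem.List.pyRange 0 (PySem.Str.len b) 1).filter
      (fun i => PySem.Str.pyGet? b i == some 'B') with hbp
  set w := PySem.List.pyRange s (s + 2 * k) 2 with hw
  rw [PySem.List.foldl_if_add_one (fun j => !(bp.contains j)) w 0]
  have hmemw : ∀ j ∈ w, 0 ≤ j ∧ j < (b.toList.length : Int) := by
    intro j hj
    rw [hw, PySem.List.mem_pyRange_iff_of_pos (by norm_num : (0:Int) < 2)] at hj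
    obtain ⟨hja, hjb, hjd⟩ := hj
    omega
  have hcong : List.countP (fun j => bp.contains j) w = List.countP (pvBall b) w := by
    apply List.countP_congr
    intro j hj
    obtain ⟨hj0, hj1⟩ := hmemw j hj
    rw [hbp, pvBP_contains b j hj0 hj1]
  have hlen := List.length_eq_countP_add_countP (fun j => bp.contains j) (l := w)
  have hwl := pvWindow_length k s hk
  rw [← hw] at hwl
  have hneg : List.countP (fun j => !(bp.contains j)) w
      = List.countP (fun a => decide ¬bp.contains a = true) w := by
    apply List.countP_congr
    intro a _
    cases hcv : bp.contains a <;> simp_all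
  rw [pvCnt, ← hw, ← hcong, hneg]
  omega

theorem pvB_loop (b : String) (k m : Int) (hk : 0 ≤ k) :
    ∀ (T : Nat) (a best : Int), (m - a).toNat ≤ 2 * T →
    ((PySem.List.pyRange a m 2).foldl
      (fun (st : Int × Int) s =>
        let cur := st.1 + (if PySem.Str.pyGet? b (s + 2 * k - 2) == some 'B' then 1 else 0)
                        - (if PySem.Str.pyGet? b (s - 2) == some 'B' then 1 else 0)
        (cur, min st.2 (k - cur))) (pvCnt b k (a - 2), best)).2
      = (PySem.List.pyRange a m 2).foldl (fun acc s => min acc (k - pvCnt b k s)) best := by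
  intro T
  induction T with
  | zero =>
    intro a best hT
    have : PySem.List.pyRange a m 2 = [] := by
      rw [PySem.List.pyRange_of_pos _ _ (by norm_num : (0:Int) < 2)]
      have : ¬ a < m := by omega
      simp [this]
    rw [this]
    rfl
  | succ T ih =>
    intro a best hT
    by_cases ham : a < m
    · rw [pvRange_two_cons a m ham]
      simp only [List.foldl_cons]
      have hcur : pvCnt b k (a - 2)
            + (if PySem.Str.pyGet? b (a + 2 * k - 2) == some 'B' then 1 else 0)
            - (if PySem.Str.pyGet? b (a - 2) == some 'B' then 1 else 0)
          = pvCnt b k a := by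
        have := pvCnt_slide b k (a - 2) hk
        have h2 : a - 2 + 2 = a := by ring
        rw [h2] at this
        rw [this, pvBall, pvBall]
        have h3 : a - 2 + 2 * k = a + 2 * k - 2 := by ring
        rw [h3]
      have hstate : ((pvCnt b k (a - 2)
            + (if PySem.Str.pyGet? b (a + 2 * k - 2) == some 'B' then 1 else 0)
            - (if PySem.Str.pyGet? b (a - 2) == some 'B' then 1 else 0),
            min best (k - (pvCnt b k (a - 2)
            + (if PySem.Str.pyGet? b (a + 2 * k - 2) == some 'B' then 1 else 0)
            - (if PySem.Str.pyGet? b (a - 2) == some 'B' then 1 else 0)))) : Int × Int)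
          = (pvCnt b k ((a + 2) - 2), min best (k - pvCnt b k a)) := by
        rw [hcur]
        have h4 : a + 2 - 2 = a := by ring
        rw [h4]
      rw [hstate]
      exact ih (a + 2) (min best (k - pvCnt b k a)) (by omega)
    · have : PySem.List.pyRange a m 2 = [] := by
        rw [PySem.List.pyRange_of_pos _ _ (by norm_num : (0:Int) < 2)]
        simp [ham]
      rw [this]
      rfl

theorem pvFinal (b : String) (k m n : Int) (hkn : k ≤ n)
    (hm1 : 1 ≤ m) (hcnt0 : ∀ s : Int, 0 ≤ pvCnt b k s) :
    (PySem.List.pyRange 0 m 1).foldl (fun acc s => min acc (k - pvCnt b k s)) n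
      = (PySem.List.pyRange 0 m 2 ++ PySem.List.pyRange 1 m 2).foldl
          (fun acc s => min acc (k - pvCnt b k s)) k := by
  rw [← List.foldl_map (f := fun s => k - pvCnt b k s) (g := min)
        (l := PySem.List.pyRange 0 m 1) (init := n),
      ← List.foldl_map (f := fun s => k - pvCnt b k s) (g := min)
        (l := PySem.List.pyRange 0 m 2 ++ PySem.List.pyRange 1 m 2) (init := k)]
  set f : Int → Int := fun s => k - pvCnt b k s with hf
  set A := ((PySem.List.pyRange 0 m 1).map f).foldl min n with hAdef
  set B := ((PySem.List.pyRange 0 m 2 ++ PySem.List.pyRange 1 m 2).map f).foldl min k with hBdef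
  have hfk : ∀ s : Int, f s ≤ k := by
    intro s
    have := hcnt0 s
    simp only [hf]
    omega
  have hAle : ∀ s : Int, 0 ≤ s → s < m → A ≤ f s := by
    intro s h0 h1
    exact (PySem.List.foldl_min_le _ n).2 (f s)
      (List.mem_map.mpr ⟨s, PySem.List.mem_pyRange_one.mpr ⟨h0, h1⟩, rfl⟩)
  have hBle : ∀ s : Int, 0 ≤ s → s < m → B ≤ f s := by
    intro s h0 h1
    apply (PySem.List.foldl_min_le _ k).2 (f s)
    apply List.mem_map.mpr
    refine ⟨s, ?_, rfl⟩
    rw [List.mem_append]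
    by_cases hd : (2:Int) ∣ s
    · left
      rw [PySem.List.mem_pyRange_iff_of_pos (by norm_num : (0:Int) < 2)]
      refine ⟨h0, h1, ?_⟩
      simpa using hd
    · right
      rw [PySem.List.mem_pyRange_iff_of_pos (by norm_num : (0:Int) < 2)]
      refine ⟨by omega, h1, ?_⟩
      omega
  apply le_antisymm
  · rcases PySem.List.foldl_min_mem ((PySem.List.pyRange 0 m 2 ++ PySem.List.pyRange 1 m 2).map f) k
        with hB | hB
    · rw [← hBdef] at hB
      rw [hB]
      calc A ≤ f 0 := hAle 0 le_rfl (by omega)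
        _ ≤ k := hfk 0
    · rw [← hBdef] at hB
      obtain ⟨s, hsmem, hfs⟩ := List.mem_map.mp hB
      rw [List.mem_append] at hsmem
      have hs : 0 ≤ s ∧ s < m := by
        rcases hsmem with h | h <;>
          rw [PySem.List.mem_pyRange_iff_of_pos (by norm_num : (0:Int) < 2)] at h <;>
          exact ⟨by omega, h.2.1⟩
      rw [← hfs]
      exact hAle s hs.1 hs.2
  · rcases PySem.List.foldl_min_mem ((PySem.List.pyRange 0 m 1).map f) n with hA | hA
    · rw [← hAdef] at hA
      rw [hA]
      calc B ≤ k := (PySem.List.foldl_min_le _ k).1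
        _ ≤ n := hkn
    · rw [← hAdef] at hA
      obtain ⟨s, hsmem, hfs⟩ := List.mem_map.mp hA
      rw [PySem.List.mem_pyRange_one] at hsmem
      rw [← hfs]
      exact hBle s hsmem.1 hsmem.2

theorem pv_solution_eq (b : String) : solution b = solution_alt b := by
  have hlen := PySem.Str.len_eq b
  set n : Int := (b.toList.length : Int) with hn
  set k : Int := (b.toList.countP (fun c => c == 'B') : Int) with hkdef
  have hk0 : 0 ≤ k := by positivity
  have hkn : k ≤ n := by
    rw [hkdef, hn]
    exact_mod_cast List.countP_le_length
  have hA : solution b = if k > PySem.Int.floordiv (n + 1) 2 then -1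
      else (PySem.List.pyRange 0 (n - 2 * k + 2) 1).foldl
        (fun mm start => min mm ((PySem.List.pyRange start (start + 2 * k) 2).foldl
            (fun c j => if !(((PySem.List.pyRange 0 (PySem.Str.len b) 1).filter
                (fun i => PySem.Str.pyGet? b i == some 'B')).contains j) then c + 1 else c) 0)) n := by
    rw [solution]
    rw [pvBP_length b, hlen]
  have hB : solution_alt b = if k > PySem.Int.floordiv (n + 1) 2 then -1
      else (PySem.List.pyRange 0 (min 2 (n - 2 * k + 2)) 1).foldl
        (fun best p =>
          ((PySem.List.pyRange (p + 2) (n - 2 * k + 2) 2).foldl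
            (fun (st : Int × Int) s =>
              let cur := st.1 + (if PySem.Str.pyGet? b (s + 2 * k - 2) == some 'B' then 1 else 0)
                              - (if PySem.Str.pyGet? b (s - 2) == some 'B' then 1 else 0)
              (cur, min st.2 (k - cur)))
            ((PySem.List.pyRange p (p + 2 * k) 2).foldl
              (fun acc j => acc + (if PySem.Str.pyGet? b j == some 'B' then 1 else 0)) 0,
             min best (k - (PySem.List.pyRange p (p + 2 * k) 2).foldl
              (fun acc j => acc + (if PySem.Str.pyGet? b j == some 'B' then 1 else 0)) 0))).2) k := by
    rw [solution_alt]
    rw [pvK_eq b, hlen]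
  rw [hA, hB]
  by_cases hg : k > PySem.Int.floordiv (n + 1) 2
  · rw [if_pos hg, if_pos hg]
  · rw [if_neg hg, if_neg hg]
    set m : Int := n - 2 * k + 2 with hm
    have hm1 : 1 ≤ m := by
      have h2 : 2 * PySem.Int.floordiv (n + 1) 2 ≤ n + 1 := by
        simp only [PySem.Int.floordiv, Int.fdiv_eq_ediv]
        omega
      omega
    have hcnt0 : ∀ s : Int, 0 ≤ pvCnt b k s := by
      intro s
      exact Int.natCast_nonneg _
    -- A's loop is a min-fold of k - pvCnt over all starts
    have hAs : (PySem.List.pyRange 0 m 1).foldl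
        (fun mm start => min mm ((PySem.List.pyRange start (start + 2 * k) 2).foldl
            (fun c j => if !(((PySem.List.pyRange 0 (PySem.Str.len b) 1).filter
                (fun i => PySem.Str.pyGet? b i == some 'B')).contains j) then c + 1 else c) 0)) n
        = (PySem.List.pyRange 0 m 1).foldl (fun acc s => min acc (k - pvCnt b k s)) n := by
      apply PySem.List.foldl_congr_mem
      intro acc s hs
      rw [PySem.List.mem_pyRange_one] at hs
      rw [pvA_inner b k s hk0 hs.1 (by omega)]
    -- one parity block of B
    have hblock : ∀ (best p : Int), p < m →
        ((PySem.List.pyRange (p + 2) m 2).foldl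
            (fun (st : Int × Int) s =>
              let cur := st.1 + (if PySem.Str.pyGet? b (s + 2 * k - 2) == some 'B' then 1 else 0)
                              - (if PySem.Str.pyGet? b (s - 2) == some 'B' then 1 else 0)
              (cur, min st.2 (k - cur)))
            ((PySem.List.pyRange p (p + 2 * k) 2).foldl
              (fun acc j => acc + (if PySem.Str.pyGet? b j == some 'B' then 1 else 0)) 0,
             min best (k - (PySem.List.pyRange p (p + 2 * k) 2).foldl
              (fun acc j => acc + (if PySem.Str.pyGet? b j == some 'B' then 1 else 0)) 0))).2
        = (PySem.List.pyRange p m 2).foldl (fun acc s => min acc (k - pvCnt b k s)) best := by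
      intro best p hpm
      have hcur0 : (PySem.List.pyRange p (p + 2 * k) 2).foldl
          (fun acc j => acc + (if PySem.Str.pyGet? b j == some 'B' then 1 else 0)) 0
          = pvCnt b k p := by
        rw [PySem.List.foldl_add _ (fun j => if PySem.Str.pyGet? b j == some 'B' then 1 else 0) 0,
            PySem.List.sum_map_ite_one_zero]
        rw [pvCnt]
        norm_num
        rfl
      rw [hcur0]
      have hp2 : pvCnt b k p = pvCnt b k ((p + 2) - 2) := by norm_num
      rw [hp2]
      rw [pvB_loop b k m hk0 (m - p).toNat (p + 2) (min best (k - pvCnt b k ((p + 2) - 2)))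
          (by omega)]
      rw [pvRange_two_cons p m hpm, List.foldl_cons]
      norm_num
    -- evaluate the list of parity starts
    rcases (by omega : 2 ≤ m ∨ m = 1) with hm2 | hm2
    · have hps : PySem.List.pyRange 0 (min 2 m) 1 = [0, 1] := by
        rw [min_eq_left (by omega : (2:Int) ≤ m)]
        decide
      rw [hps]
      simp only [List.foldl_cons, List.foldl_nil]
      rw [hblock k 0 (by omega), hblock _ 1 (by omega)]
      rw [hAs]
      -- both sides are min-folds; compare them as minima
      have hEO : (PySem.List.pyRange 1 m 2).foldl (fun acc s => min acc (k - pvCnt b k s))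
            ((PySem.List.pyRange 0 m 2).foldl (fun acc s => min acc (k - pvCnt b k s)) k)
          = (PySem.List.pyRange 0 m 2 ++ PySem.List.pyRange 1 m 2).foldl
              (fun acc s => min acc (k - pvCnt b k s)) k := by
        rw [List.foldl_append]
      rw [hEO]
      exact pvFinal b k m n hkn hm1 hcnt0
    · have hps : PySem.List.pyRange 0 (min 2 m) 1 = [0] := by
        rw [hm2]
        decide
      rw [hps]
      simp only [List.foldl_cons, List.foldl_nil]
      rw [hblock k 0 (by omega), hAs]
      have hO : PySem.List.pyRange 1 m 2 = [] := by
        rw [PySem.List.pyRange_of_pos _ _ (by norm_num : (0:Int) < 2)]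
        have : ¬ (1:Int) < m := by omega
        simp [this]
      have : PySem.List.pyRange 0 m 2 = PySem.List.pyRange 0 m 2 ++ PySem.List.pyRange 1 m 2 := by
        rw [hO, List.append_nil]
      rw [this]
      exact pvFinal b k m n hkn hm1 hcnt0

-- ===== VERDICT (by name: the statement is the Claim_ definition above) =====
theorem solution_spec : Claim_equal_solution := by
  intro buckets _
  unfold Spec_solution
  exact pv_solution_eq buckets
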